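-- pv_equiv track=rewrite | github.com/dongzhe1/cs3b | assignment2/q4.py | generate_row_recursive
-- ===== SOURCE A (Python) =====
-- def generate_row_recursive(n, memo):
--     if n == 1:
--         row = "0"
--         memo.append(row)
--         return row
--
--     prev_row = generate_row_recursive(n - 1, memo)
--     current_row = "".join("01" if char == "0" else "10" for char in prev_row)
--     memo.append(current_row)
--
--     return current_row
-- ===== SOURCE B (Python) =====
-- def generate_row_recursive(n, memo):
--     row = "0"
--     memo.append(row)
--     for _ in range(2, n + 1):
--         row = "".join("01" if c == "0" else "10" for c in row)
--         memo.append(row)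
--     return row
-- ===== Notes on version B (the rewrite author's own statement) =====
-- stated objective: simpler
-- what changed: Replaces top-down recursion (n stack frames) with a bottom-up loop that keeps only the current row and appends to memo in the same 1..n order.
import Mathlib
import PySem

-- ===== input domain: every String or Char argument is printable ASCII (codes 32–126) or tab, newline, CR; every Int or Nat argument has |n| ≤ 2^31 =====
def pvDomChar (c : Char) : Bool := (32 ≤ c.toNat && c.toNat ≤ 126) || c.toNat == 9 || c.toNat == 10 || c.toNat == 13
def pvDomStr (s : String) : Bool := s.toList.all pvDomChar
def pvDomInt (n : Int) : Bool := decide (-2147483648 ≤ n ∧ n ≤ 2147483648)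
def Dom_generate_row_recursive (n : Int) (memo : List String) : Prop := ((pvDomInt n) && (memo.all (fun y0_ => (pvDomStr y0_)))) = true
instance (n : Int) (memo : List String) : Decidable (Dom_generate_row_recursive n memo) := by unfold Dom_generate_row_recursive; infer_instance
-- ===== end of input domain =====

-- B replaces A's top-down recursion by a bottom-up loop keeping only the current row;
-- equivalence is about the RETURN value (both Pythons append the rows 1..n to memo in the same order).

-- ===== PORT A =====
-- "".join("01" if char == "0" else "10" for char in row)
def pvExpand (row : String) : String :=
  String.ofList (row.toList.flatMap (fun char => if char = '0' then ['0', '1'] else ['1', '0']))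

-- A's recursion on n, carried out on n.toNat (Pre_ guarantees n ≥ 1, where the two agree;
-- for n ≤ 0 the Python recurses forever, excluded by Pre_).
def pvRowA : Nat → String
  | 0 => ""
  | 1 => "0"
  | m + 2 => pvExpand (pvRowA (m + 1))

def generate_row_recursive (n : Int) (_memo : List String) : String := pvRowA n.toNat

-- ===== PORT B =====
def generate_row_recursive_alt (n : Int) (_memo : List String) : String :=
  (PySem.List.pyRange 2 (n + 1) 1).foldl (fun row _ => pvExpand row) "0"

-- ===== PRECONDITION & SPEC =====
-- For n ≤ 0 the Python A recurses with no base case and raises RecursionError.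
def Pre_generate_row_recursive (n : Int) (_memo : List String) : Prop := 1 ≤ n
instance (n : Int) (memo : List String) : Decidable (Pre_generate_row_recursive n memo) := by
  unfold Pre_generate_row_recursive; infer_instance

def pvWitness_generate_row_recursive : Int × List String := (3, ["x"])


def Spec_generate_row_recursive (n : Int) (memo : List String) (out : String) : Prop :=
  out = generate_row_recursive_alt n memo
instance (n : Int) (memo : List String) (out : String) : Decidable (Spec_generate_row_recursive n memo out) := by
  unfold Spec_generate_row_recursive; infer_instance

-- ===== CLAIM =====
def Claim_equal_generate_row_recursive : Prop := ∀ (n : Int) (memo : List String),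
  Dom_generate_row_recursive n memo → Pre_generate_row_recursive n memo →
  Spec_generate_row_recursive n memo (generate_row_recursive n memo)


-- ===== LEMMAS AND PROOFS =====
-- B's fold over range(2, m+1) computes A's recursion, by induction on m ≥ 1.
lemma pvRowB_eq (m : Nat) (h : 1 ≤ m) :
    (PySem.List.pyRange 2 ((m : Int) + 1) 1).foldl (fun row _ => pvExpand row) "0" = pvRowA m := by
  induction m with
  | zero => omega
  | succ k ih =>
    by_cases hk : 1 ≤ k
    · have hsplit : PySem.List.pyRange 2 ((k : Int) + 1 + 1) 1
          = PySem.List.pyRange 2 ((k : Int) + 1) 1 ++ [(k : Int) + 1] := by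
        have := PySem.List.pyRange_one_succ_right (a := 2) (b := (k : Int) + 1) (by omega)
        simpa using this
      rw [show ((k + 1 : Nat) : Int) + 1 = (k : Int) + 1 + 1 by push_cast; ring, hsplit,
        List.foldl_append, ih hk]
      obtain ⟨k', rfl⟩ : ∃ k', k = k' + 1 := ⟨k - 1, by omega⟩
      simp [pvRowA]
    · have hk0 : k = 0 := by omega
      subst hk0
      have : PySem.List.pyRange 2 ((1 : Int) + 1) 1 = [] :=
        PySem.List.pyRange_one_eq_nil (by omega)
      have h2 : ((0 + 1 : Nat) : Int) + 1 = 1 + 1 := by norm_num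
      rw [h2, this]; simp [pvRowA]

-- ===== VERDICT =====
theorem generate_row_recursive_spec : Claim_equal_generate_row_recursive := by
  intro n memo _ hpre
  unfold Pre_generate_row_recursive at hpre
  unfold Spec_generate_row_recursive generate_row_recursive generate_row_recursive_alt
  have hn : ((n.toNat : Int)) = n := Int.toNat_of_nonneg (by exact le_trans (by norm_num) hpre)
  rw [← hn]
  exact (pvRowB_eq n.toNat (by omega)).symm
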